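-- pv_equiv track=rewrite | github.com/17wook2/Algorithm | 프로그래머스/뉴스 클러스터링.py | pause
-- ===== SOURCE A (Python) =====
-- def pause(string):
--     arr = []
--     for i in range(len(string)-1):
--         if string[i].isalpha() and string[i+1].isalpha():
--             tmp = string[i] + string[i+1]
--             tmp = tmp.lower()
--             arr.append(tmp)
--     return arr
-- ===== SOURCE B (Python) =====
-- def pause(string):
--     out = []
--     n = len(string)
--     i = 0
--     while i < n:
--         if string[i].isalpha():
--             j = i
--             while j < n and string[j].isalpha():
--                 j += 1
--             run = string[i:j].lower()
--             out.extend(a + b for a, b in zip(run, run[1:]))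
--             i = j
--         else:
--             i += 1
--     return out
-- ===== Notes on version B (the rewrite author's own statement) =====
-- stated objective: alternative
-- what changed: Instead of a flat index scan testing string[i] and string[i+1] per position, B extracts each maximal alphabetic run with a two-pointer scan, lowercases the run once, and emits its adjacent bigrams via zip.
import Mathlib
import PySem

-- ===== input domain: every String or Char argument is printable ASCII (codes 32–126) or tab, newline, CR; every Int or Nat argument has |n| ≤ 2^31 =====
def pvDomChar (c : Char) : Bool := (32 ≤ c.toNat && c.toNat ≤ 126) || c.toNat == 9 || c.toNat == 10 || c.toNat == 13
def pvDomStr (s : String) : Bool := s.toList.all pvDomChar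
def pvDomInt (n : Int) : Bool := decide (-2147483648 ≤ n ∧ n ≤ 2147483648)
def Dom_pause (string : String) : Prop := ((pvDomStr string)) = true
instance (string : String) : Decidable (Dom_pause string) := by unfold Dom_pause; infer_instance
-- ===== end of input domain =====

-- B replaces A's flat per-index scan by maximal-alphabetic-run extraction; same return value, proved below.

-- ===== PORT A =====
def pause (string : String) : List String :=
  (PySem.List.pyRange 0 ((string.toList.length : Int) - 1) 1).foldl
    (fun arr i =>
      if PySem.Chars.isalpha (PySem.List.pyGetD string.toList i ' ')
          && PySem.Chars.isalpha (PySem.List.pyGetD string.toList (i + 1) ' ') then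
        arr ++ [String.ofList (PySem.Chars.lower
          [PySem.List.pyGetD string.toList i ' ', PySem.List.pyGetD string.toList (i + 1) ' '])]
      else arr) []

-- ===== PORT B =====
-- bigrams of a run: zip(run, run[1:])
def pauseBigrams (run : List Char) : List String :=
  (run.zip run.tail).map (fun p => String.ofList [p.1, p.2])

-- B's outer loop: at an alphabetic char, take the maximal alphabetic run, lowercase it,
-- emit its bigrams, continue after the run; otherwise step one char.
def pauseGo : List Char → List String
  | [] => []
  | c :: cs =>
    if PySem.Chars.isalpha c then
      pauseBigrams (PySem.Chars.lower (c :: cs.takeWhile PySem.Chars.isalpha))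
        ++ pauseGo (cs.dropWhile PySem.Chars.isalpha)
    else pauseGo cs
  termination_by s => s.length
  decreasing_by
    · simpa using Nat.lt_succ_of_le (List.length_dropWhile_le _ _)
    · simp

def pause_alt (string : String) : List String := pauseGo string.toList

-- ===== PRECONDITION & SPEC =====
def Spec_pause (string : String) (out : List String) : Prop := out = pause_alt string
instance (string : String) (out : List String) : Decidable (Spec_pause string out) := by unfold Spec_pause; infer_instance

-- ===== CLAIM (what is proved, stated in full; the proofs are below) =====
def Claim_equal_pause : Prop := ∀ (string : String), Dom_pause string → Spec_pause string (pause string)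

-- ===== LEMMAS AND PROOFS =====

-- common reference form: filter the adjacent-pair list, lowercase each kept pair
def pairSpec (s : List Char) : List String :=
  ((s.zip s.tail).filter (fun p => PySem.Chars.isalpha p.1 && PySem.Chars.isalpha p.2)).map
    (fun p => String.ofList (PySem.Chars.lower [p.1, p.2]))

theorem range_pairs (s : List Char) :
    (List.range (s.length - 1)).map (fun k => (s.getD k ' ', s.getD (k + 1) ' ')) = s.zip s.tail := by
  apply List.ext_getElem
  · simp [List.length_zip, List.length_tail]
  · intro i h1 h2
    have hi : i < s.length - 1 := by simpa using h1
    have h1' : i < s.length := by omega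
    have h2' : i + 1 < s.length := by omega
    simp [List.getElem_zip, List.getElem_tail, List.getD_eq_getElem?_getD,
      List.getElem?_eq_getElem h1', List.getElem?_eq_getElem h2']

theorem pauseA_list (s : List Char) :
    (PySem.List.pyRange 0 ((s.length : Int) - 1) 1).foldl
      (fun arr i =>
        if PySem.Chars.isalpha (PySem.List.pyGetD s i ' ')
            && PySem.Chars.isalpha (PySem.List.pyGetD s (i + 1) ' ') then
          arr ++ [String.ofList (PySem.Chars.lower
            [PySem.List.pyGetD s i ' ', PySem.List.pyGetD s (i + 1) ' '])]
        else arr) [] = pairSpec s := by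
  rw [PySem.List.foldl_append_if]
  rcases Nat.eq_zero_or_pos s.length with h0 | h0
  · have hnil : s = [] := List.length_eq_zero_iff.mp h0
    subst hnil
    rw [PySem.List.pyRange_one_eq_nil (by norm_num)]
    simp [pairSpec]
  · have hm : ((s.length : Int) - 1) = ((s.length - 1 : Nat) : Int) := by omega
    rw [hm, PySem.List.pyRange_zero_natCast, List.filter_map, List.map_map]
    have e2 : ∀ k : Nat, PySem.List.pyGetD s ((k : Int) + 1) ' ' = s.getD (k + 1) ' ' := by
      intro k
      have : ((k : Int) + 1) = (((k + 1 : Nat)) : Int) := by push_cast; ring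
      rw [this, PySem.List.pyGetD_natCast]
    have hfil : (List.range (s.length - 1)).filter
          (fun k : Nat => PySem.Chars.isalpha (PySem.List.pyGetD s ((k : Int)) ' ')
            && PySem.Chars.isalpha (PySem.List.pyGetD s ((k : Int) + 1) ' '))
        = (List.range (s.length - 1)).filter
          (fun k : Nat => PySem.Chars.isalpha (s.getD k ' ')
            && PySem.Chars.isalpha (s.getD (k + 1) ' ')) := by
      apply List.filter_congr; intro k _
      rw [PySem.List.pyGetD_natCast, e2]
    unfold pairSpec
    rw [← range_pairs s, List.filter_map, List.map_map]
    simp only [Function.comp_def, List.nil_append]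
    rw [hfil]
    apply List.map_congr_left
    intro k _
    rw [PySem.List.pyGetD_natCast, e2]

theorem pause_eq_pairSpec (string : String) : pause string = pairSpec string.toList := by
  unfold pause; exact pauseA_list string.toList

theorem pairSpec_cons_cons (a b : Char) (r : List Char) :
    pairSpec (a :: b :: r)
      = (if PySem.Chars.isalpha a && PySem.Chars.isalpha b
          then [String.ofList (PySem.Chars.lower [a, b])] else []) ++ pairSpec (b :: r) := by
  simp only [pairSpec, List.tail_cons, List.zip_cons_cons, List.filter_cons]
  split_ifs <;> simp

theorem pauseBigrams_cons_cons (x y : Char) (t : List Char) :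
    pauseBigrams (x :: y :: t) = String.ofList [x, y] :: pauseBigrams (y :: t) := by
  simp [pauseBigrams]

theorem lower_cons (c : Char) (t : List Char) :
    PySem.Chars.lower (c :: t) = PySem.Chars.lowerChar c :: PySem.Chars.lower t := by
  simp [PySem.Chars.lower]

theorem run_lemma (cs : List Char) : ∀ (c : Char), PySem.Chars.isalpha c = true →
    pauseBigrams (PySem.Chars.lower (c :: cs.takeWhile PySem.Chars.isalpha))
        ++ pairSpec (cs.dropWhile PySem.Chars.isalpha) = pairSpec (c :: cs) := by
  induction cs with
  | nil => intro c _; simp [pauseBigrams, pairSpec, PySem.Chars.lower]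
  | cons b r ih =>
    intro c hc
    by_cases hb : PySem.Chars.isalpha b = true
    · rw [List.takeWhile_cons_of_pos hb, List.dropWhile_cons_of_pos hb]
      rw [lower_cons, lower_cons, pauseBigrams_cons_cons, ← lower_cons]
      rw [List.cons_append, ih b hb, pairSpec_cons_cons, hc, hb]
      simp [PySem.Chars.lower]
    · have hb' : PySem.Chars.isalpha b = false := by simpa using hb
      rw [List.takeWhile_cons_of_neg (by simp [hb']), List.dropWhile_cons_of_neg (by simp [hb'])]
      rw [pairSpec_cons_cons, hb']
      simp [pauseBigrams, PySem.Chars.lower]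

theorem pauseGo_eq_pairSpec (s : List Char) : pauseGo s = pairSpec s := by
  induction s using pauseGo.induct with
  | case1 => simp [pauseGo, pairSpec]
  | case2 c cs hc ih =>
    rw [pauseGo]
    simp only [hc, if_pos]
    rw [ih, run_lemma cs c hc]
  | case3 c cs hc ih =>
    rw [pauseGo]
    simp only [hc]
    rw [ih]
    rcases cs with _ | ⟨b, r⟩
    · simp [pairSpec]
    · rw [pairSpec_cons_cons]
      simp [Bool.not_eq_true] at hc
      simp [hc]

-- ===== VERDICT (by name: the statement is the Claim_ definition above) =====
theorem pause_spec : Claim_equal_pause := by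
  intro string _
  unfold Spec_pause pause_alt
  rw [pause_eq_pairSpec, pauseGo_eq_pairSpec]
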